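-- pv_equiv track=rewrite | github.com/Kyoung-yeon99/Jump_to_Algorithm | Jump_to_Algorithm2/week23/eunbiPark/광물_캐기.py | solution
-- ===== SOURCE A (Python) =====
-- def solution(picks, minerals):
--     total = sum(picks) * 5 # 캘 수 있는 광물의 수
--     # 캘 수 있는 만큼만 광물 자르기
--     minerals = minerals[:min(len(minerals), total)]
--
--     # 조사
--     cnt = [[0, 0, 0] for _ in range(10)] # 다이아, 철, 돌 하나의 곡괭이로 캘 수 있는 돌의 유형을 조사, minerals의 최대 길이 <= 50 이기에 5개씩 10그룹 -> range(50)
--     for i in range(len(minerals)):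
--         if minerals[i] == 'diamond':
--             cnt[i//5][0] += 1
--         elif minerals[i] == 'iron':
--             cnt[i//5][1] += 1
--         else:
--             cnt[i//5][2] += 1
--
--     # 피로도가 높은 순서대로 정렬
--     cnt.sort(key = lambda x: (-x[0], -x[1], -x[2]))
--     # cnt.sort(key = lambda x: (x[2], x[1], x[0])) # 이건 안된다
--
--     # 피로도 계산
--     ans = 0
--     for m in cnt:
--         d, i, s = m
--         for p in range(len(picks)):
--             if p == 0 and picks[p] > 0: # 다이아를 쓸 수 있을 때
--                 picks[p] -= 1
--                 ans += (d + i + s)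
--                 break
--             elif p == 1 and picks[p] > 0:
--                 picks[p] -= 1
--                 ans += (5 * d + i + s)
--                 break
--             elif p == 2 and picks[p] > 0:
--                 picks[p] -= 1
--                 ans += (25 * d + 5 * i + s)
--                 break
--
--     return ans
-- ===== SOURCE B (Python) =====
-- def solution(picks, minerals):
--     # Counting-sort re-implementation (return value only; unlike A it does not mutate picks).
--     usable = minerals[:min(len(minerals), sum(picks) * 5)]
--     # histogram of per-chunk signatures instead of building and comparison-sorting a group list
--     sig = {}
--     for g in range(0, len(usable), 5):
--         chunk = usable[g:g + 5]
--         d = chunk.count('diamond')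
--         i = chunk.count('iron')
--         k = (d, i, len(chunk) - d - i)
--         sig[k] = sig.get(k, 0) + 1
--     # walk all possible signatures in decreasing order, consuming pickaxes best-first
--     cost = ((1, 1, 1), (5, 1, 1), (25, 5, 1))
--     rem = list(picks[:3])
--     lvl = 0
--     ans = 0
--     for d in range(5, -1, -1):
--         for i in range(5 - d, -1, -1):
--             for s in range(5 - d - i, -1, -1):
--                 n = sig.get((d, i, s), 0)
--                 while n > 0:
--                     while lvl < len(rem) and rem[lvl] <= 0:
--                         lvl += 1
--                     if lvl >= len(rem):
--                         return ans
--                     cd, ci, cs = cost[lvl]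
--                     ans += cd * d + ci * i + cs * s
--                     rem[lvl] -= 1
--                     n -= 1
--     return ans
-- ===== Notes on version B (the rewrite author's own statement) =====
-- stated objective: alternative
-- what changed: A builds a fixed 10-row count table with per-element indexed updates, comparison-sorts it with a negated-tuple key, and pays each row via a mutating inner break-loop over picks; B instead slices the usable minerals into chunks, histograms the chunk signatures in a dict, and walks the 56 possible signatures in decreasing order (a counting sort), consuming the pickaxe supply with a single advancing level pointer (B does not mutate picks; equivalence is about the return value). Pre_ excludes only the inputs where A raises IndexError.
import Mathlib
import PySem

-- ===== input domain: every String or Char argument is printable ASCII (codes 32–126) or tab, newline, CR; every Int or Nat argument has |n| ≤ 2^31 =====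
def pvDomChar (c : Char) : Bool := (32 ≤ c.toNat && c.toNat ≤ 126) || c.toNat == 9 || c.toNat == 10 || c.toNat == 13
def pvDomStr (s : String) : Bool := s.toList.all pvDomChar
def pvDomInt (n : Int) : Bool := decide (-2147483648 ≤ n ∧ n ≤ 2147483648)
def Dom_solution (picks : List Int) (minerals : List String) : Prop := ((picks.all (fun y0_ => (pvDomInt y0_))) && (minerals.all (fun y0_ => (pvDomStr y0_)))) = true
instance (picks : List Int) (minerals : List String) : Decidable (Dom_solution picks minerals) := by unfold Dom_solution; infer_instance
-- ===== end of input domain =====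

-- B replaces A's fixed 10-bucket table + comparison sort + mutating pick-selection
-- break-loop by a signature histogram walked in decreasing order (counting sort) with an
-- advancing pickaxe-level pointer (return value only — A also mutates `picks` in place,
-- B does not).


-- ===== PORT A =====
-- cnt[i//5][j] += 1 for the class j of minerals[i]; an index i//5 ≥ 10 is a Python
-- IndexError (excluded by Pre_solution; List.modify is a no-op there).
def aCountStep (ms : List String) (cnt : List (List Int)) (i : Nat) : List (List Int) :=
  if ms.getD i "" = "diamond" then cnt.modify (i / 5) (fun t => t.modify 0 (· + 1))
  else if ms.getD i "" = "iron" then cnt.modify (i / 5) (fun t => t.modify 1 (· + 1))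
  else cnt.modify (i / 5) (fun t => t.modify 2 (· + 1))

-- cnt.sort(key=lambda x: (-x[0], -x[1], -x[2])): Python's tuple '<' written out
-- lexicographically
def keyLtA (x y : List Int) : Bool :=
  decide (-(x.getD 0 0) < -(y.getD 0 0)) ||
    (!decide (-(y.getD 0 0) < -(x.getD 0 0)) &&
      (decide (-(x.getD 1 0) < -(y.getD 1 0)) ||
        (!decide (-(y.getD 1 0) < -(x.getD 1 0)) && decide (-(x.getD 2 0) < -(y.getD 2 0)))))

-- 'for p in range(len(picks)): … break', with picks[p] -= 1 on the taken branch
def pickScan (pk : List Int) (d i s : Int) (p : Nat) : List Int × Int :=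
  if p < pk.length then
    if p = 0 ∧ 0 < pk.getD p 0 then (pk.modify p (· - 1), d + i + s)
    else if p = 1 ∧ 0 < pk.getD p 0 then (pk.modify p (· - 1), 5 * d + i + s)
    else if p = 2 ∧ 0 < pk.getD p 0 then (pk.modify p (· - 1), 25 * d + 5 * i + s)
    else pickScan pk d i s (p + 1)
  else (pk, 0)
termination_by pk.length - p

def payStep (st : List Int × Int) (m : List Int) : List Int × Int :=
  let d := m.getD 0 0
  let i := m.getD 1 0
  let s := m.getD 2 0
  let r := pickScan st.1 d i s 0
  (r.1, st.2 + r.2)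

def solution (picks : List Int) (minerals : List String) : Int :=
  let total := picks.sum * 5
  let ms := PySem.List.slice minerals none (some (min (minerals.length : Int) total))
  let cnt := (List.range ms.length).foldl (aCountStep ms) (List.replicate 10 [0, 0, 0])
  -- list.sort is the stable insertion sort (PySem.List.sorted_eq_foldl_insertBy)
  let cntS := cnt.foldl (fun acc x => PySem.List.insertBy keyLtA x acc) []
  (cntS.foldl payStep (picks, (0 : Int))).2

-- ===== PORT B =====
-- signature of the chunk usable[g:g+5]: (#diamond, #iron, rest)
def bSigma (usable : List String) (g : Int) : Int × Int × Int :=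
  ((PySem.List.count (PySem.List.slice usable (some g) (some (g + 5))) "diamond" : Int),
   (PySem.List.count (PySem.List.slice usable (some g) (some (g + 5))) "iron" : Int),
   ((PySem.List.slice usable (some g) (some (g + 5))).length : Int)
     - (PySem.List.count (PySem.List.slice usable (some g) (some (g + 5))) "diamond" : Int)
     - (PySem.List.count (PySem.List.slice usable (some g) (some (g + 5))) "iron" : Int))

def bCost : List (Int × Int × Int) := [(1, 1, 1), (5, 1, 1), (25, 5, 1)]

def costOf (l : Nat) (k : Int × Int × Int) : Int :=
  let c := bCost.getD l (0, 0, 0)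
  c.1 * k.1 + c.2.1 * k.2.1 + c.2.2 * k.2.2

-- 'while lvl < len(rem) and rem[lvl] <= 0: lvl += 1' (walks the still-unseen part of rem)
def advanceAux : List Int → Nat → Nat
  | r :: t, lvl => if r ≤ 0 then advanceAux t (lvl + 1) else lvl
  | [], lvl => lvl

def advance (rem : List Int) (lvl : Nat) : Nat := advanceAux (rem.drop lvl) lvl

-- 'while n > 0: …' consuming one group per iteration (fuel n.toNat, since n -= 1 each
-- round); '.inr ans' is the early 'return ans' of B (the rest of the fold leaves it frozen)
def consumeAux (k : Int × Int × Int) : (List Int × Nat × Int) → Nat → (List Int × Nat × Int) ⊕ Int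
  | s, 0 => .inl s
  | s, m + 1 =>
    let l := advance s.1 s.2.1
    if s.1.length ≤ l then .inr s.2.2
    else consumeAux k (s.1.modify l (· - 1), l, s.2.2 + costOf l k) m

def consume (s : List Int × Nat × Int) (k : Int × Int × Int) (n : Int) :
    (List Int × Nat × Int) ⊕ Int := consumeAux k s n.toNat

def bPayStep (sig : PySem.Dict (Int × Int × Int) Int)
    (st : (List Int × Nat × Int) ⊕ Int) (k : Int × Int × Int) :
    (List Int × Nat × Int) ⊕ Int :=
  match st with
  | .inr a => .inr a
  | .inl s => consume s k (sig.getD k 0)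

-- the triple loop 'for d in range(5,-1,-1): for i in range(5-d,-1,-1): for s in …'
def sigTriples : List (Int × Int × Int) :=
  (PySem.List.pyRange 5 (-1) (-1)).flatMap (fun d =>
    (PySem.List.pyRange (5 - d) (-1) (-1)).flatMap (fun i =>
      (PySem.List.pyRange (5 - d - i) (-1) (-1)).map (fun s => (d, i, s))))

def solution_alt (picks : List Int) (minerals : List String) : Int :=
  let usable := PySem.List.slice minerals none (some (min (minerals.length : Int) (picks.sum * 5)))
  let sig := (PySem.List.pyRange 0 (usable.length : Int) 5).foldl
      (fun dct g => dct.insert (bSigma usable g) (dct.getD (bSigma usable g) 0 + 1))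
      PySem.Dict.empty
  let rem := PySem.List.slice picks none (some 3)
  match sigTriples.foldl (bPayStep sig) (.inl (rem, 0, 0)) with
  | .inl s => s.2.2
  | .inr a => a

-- ===== PRECONDITION & SPEC =====
-- Pre_solution excludes exactly the inputs on which A raises: when the truncated mineral
-- list minerals[:min(len(minerals), 5*sum(picks))] is longer than 50, A's fixed 10-bucket
-- table gets index i//5 ≥ 10 and raises IndexError.
def Pre_solution (picks : List Int) (minerals : List String) : Prop :=
  (if picks.sum * 5 < 0 then max ((minerals.length : Int) + picks.sum * 5) 0
   else min (minerals.length : Int) (picks.sum * 5)) ≤ 50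
instance (picks : List Int) (minerals : List String) : Decidable (Pre_solution picks minerals) := by unfold Pre_solution; infer_instance
def pvWitness_solution : List Int × List String := ([1, 1, 1], ["diamond", "stone", "iron"])

def Spec_solution (picks : List Int) (minerals : List String) (out : Int) : Prop := out = solution_alt picks minerals
instance (picks : List Int) (minerals : List String) (out : Int) : Decidable (Spec_solution picks minerals out) := by unfold Spec_solution; infer_instance

-- ===== CLAIM (what is proved, stated in full; the proofs are below) =====
def Claim_equal_solution : Prop := ∀ (picks : List Int) (minerals : List String), Dom_solution picks minerals → Pre_solution picks minerals → Spec_solution picks minerals (solution picks minerals)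

-- ===== LEMMAS AND PROOFS =====


theorem slice_len_le (picks : List Int) (minerals : List String)
    (h : Pre_solution picks minerals) :
    (PySem.List.slice minerals none
      (some (min (minerals.length : Int) (picks.sum * 5)))).length ≤ 50 := by
  unfold Pre_solution at h
  simp only [PySem.List.slice, PySem.List.clampIdx]
  simp only [List.length_take, List.length_drop]
  split_ifs at h ⊢ <;> omega

def toL (t : Int × Int × Int) : List Int := [t.1, t.2.1, t.2.2]
def classIdx (x : String) : Nat := if x = "diamond" then 0 else if x = "iron" then 1 else 2
def incr (j : Nat) (t : Int × Int × Int) : Int × Int × Int :=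
  if j = 0 then (t.1 + 1, t.2.1, t.2.2) else if j = 1 then (t.1, t.2.1 + 1, t.2.2)
  else (t.1, t.2.1, t.2.2 + 1)
def sumT (t : Int × Int × Int) : Int := t.1 + t.2.1 + t.2.2
def nonnegT (t : Int × Int × Int) : Prop := 0 ≤ t.1 ∧ 0 ≤ t.2.1 ∧ 0 ≤ t.2.2

-- the per-mineral state machine used as the common intermediate between A's index-based
-- table and B's chunk histogram: (flushed groups, current (d, i, s), position)
def bStep (st : List (Int × Int × Int) × (Int × Int × Int) × Nat) (m : String) :
    List (Int × Int × Int) × (Int × Int × Int) × Nat :=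
  let k := st.2.2 + 1
  let cur : Int × Int × Int :=
    if m = "diamond" then (st.2.1.1 + 1, st.2.1.2.1, st.2.1.2.2)
    else if m = "iron" then (st.2.1.1, st.2.1.2.1 + 1, st.2.1.2.2)
    else (st.2.1.1, st.2.1.2.1, st.2.1.2.2 + 1)
  if k % 5 = 0 then (st.1 ++ [cur], (0, 0, 0), k) else (st.1, cur, k)

-- Python's '<' on 3-tuples, written out lexicographically
def tripLt (a b : Int × Int × Int) : Bool :=
  decide (a.1 < b.1) || (!decide (b.1 < a.1) &&
    (decide (a.2.1 < b.2.1) || (!decide (b.2.1 < a.2.1) && decide (a.2.2 < b.2.2))))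

theorem modify_boundary (l1 : List (List Int)) (a : List Int) (t : List (List Int)) (f : List Int → List Int) :
    (l1 ++ a :: t).modify l1.length f = l1 ++ f a :: t := by
  apply List.ext_getElem?
  intro j
  rw [List.getElem?_modify]
  by_cases h : l1.length = j
  · subst h; simp
  · simp only [if_neg h]
    rcases Nat.lt_or_ge j l1.length with hj | hj
    · simp [List.getElem?_append_left hj]
    · rw [List.getElem?_append_right (by omega), List.getElem?_append_right (by omega)]
      have he : j - l1.length = (j - l1.length - 1) + 1 := by omega
      rw [he, List.getElem?_cons_succ, List.getElem?_cons_succ]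
      simp

theorem getD_concat (xs : List String) (x d : String) : (xs ++ [x]).getD xs.length d = x := by
  simp [List.getD]

theorem aCountStep_concat (xs : List String) (x : String) (cnt : List (List Int)) :
    aCountStep (xs ++ [x]) cnt xs.length =
      cnt.modify (xs.length / 5) (fun t => t.modify (classIdx x) (· + 1)) := by
  unfold aCountStep classIdx
  rw [getD_concat]
  split_ifs <;> rfl

theorem bStep_eq (st : List (Int × Int × Int) × (Int × Int × Int) × Nat) (x : String) :
    bStep st x =
      if (st.2.2 + 1) % 5 = 0 then (st.1 ++ [incr (classIdx x) st.2.1], (0, 0, 0), st.2.2 + 1)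
      else (st.1, incr (classIdx x) st.2.1, st.2.2 + 1) := by
  simp only [bStep, incr, classIdx]
  split_ifs <;> simp_all

theorem classIdx_le (x : String) : classIdx x ≤ 2 := by
  unfold classIdx; split_ifs <;> omega

theorem toL_incr (j : Nat) (hj : j ≤ 2) (t : Int × Int × Int) :
    toL (incr j t) = (toL t).modify j (· + 1) := by
  interval_cases j <;> rfl

theorem sumT_incr (j : Nat) (hj : j ≤ 2) (t : Int × Int × Int) :
    sumT (incr j t) = sumT t + 1 := by
  interval_cases j <;> simp [sumT, incr] <;> ring

theorem nonnegT_incr (j : Nat) (t : Int × Int × Int) (h : nonnegT t) :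
    nonnegT (incr j t) := by
  unfold incr nonnegT at *
  obtain ⟨h1, h2, h3⟩ := h
  split_ifs <;> refine ⟨?_, ?_, ?_⟩ <;> simp <;> omega

theorem count_inv (ms : List String) (h : ms.length ≤ 50) :
    (ms.foldl bStep ([], (0, 0, 0), 0)).2.2 = ms.length ∧
    (ms.foldl bStep ([], (0, 0, 0), 0)).1.length = ms.length / 5 ∧
    (∀ t ∈ (ms.foldl bStep ([], (0, 0, 0), 0)).1, nonnegT t) ∧
    nonnegT (ms.foldl bStep ([], (0, 0, 0), 0)).2.1 ∧
    sumT (ms.foldl bStep ([], (0, 0, 0), 0)).2.1 = (ms.length % 5 : Int) ∧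
    (List.range ms.length).foldl (aCountStep ms) (List.replicate 10 [0, 0, 0]) =
      (ms.foldl bStep ([], (0, 0, 0), 0)).1.map toL ++
        (if (ms.foldl bStep ([], (0, 0, 0), 0)).1.length < 10 then
          toL (ms.foldl bStep ([], (0, 0, 0), 0)).2.1 ::
            List.replicate (9 - (ms.foldl bStep ([], (0, 0, 0), 0)).1.length) [0, 0, 0]
        else []) := by
  induction ms using List.reverseRecOn with
  | nil => refine ⟨rfl, rfl, by simp, by simp [nonnegT], by simp [sumT], by decide⟩
  | append_singleton xs x ih =>
    rw [List.length_append, List.length_singleton] at h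
    obtain ⟨hk, hlen, hmem, hnn, hsum, heq⟩ := ih (by omega)
    set st := xs.foldl bStep ([], (0, 0, 0), 0) with hst
    have hfold : (xs ++ [x]).foldl bStep ([], (0, 0, 0), 0) = bStep st x := by
      rw [List.foldl_append]; rfl
    have hA : (List.range (xs ++ [x]).length).foldl (aCountStep (xs ++ [x])) (List.replicate 10 [0, 0, 0]) =
        aCountStep (xs ++ [x])
          ((List.range xs.length).foldl (aCountStep xs) (List.replicate 10 [0, 0, 0])) xs.length := by
      rw [List.length_append, List.length_singleton, List.range_succ, List.foldl_append,
        PySem.List.foldl_congr_mem (List.range xs.length) (aCountStep (xs ++ [x])) (aCountStep xs) _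
          (by intro acc i hi
              have hi' : i < xs.length := List.mem_range.mp hi
              unfold aCountStep
              rw [List.getD_append _ _ _ _ hi'])]
      simp only [List.foldl_cons, List.foldl_nil]
    have hgs9 : st.1.length ≤ 9 := by omega
    set j := classIdx x with hj
    have hj2 : j ≤ 2 := classIdx_le x
    have hb : bStep st x =
        if (xs.length + 1) % 5 = 0 then (st.1 ++ [incr j st.2.1], (0, 0, 0), xs.length + 1)
        else (st.1, incr j st.2.1, xs.length + 1) := by
      rw [bStep_eq, hk]
    have hCNT : (List.range (xs ++ [x]).length).foldl (aCountStep (xs ++ [x])) (List.replicate 10 [0, 0, 0]) =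
        List.map toL st.1 ++ toL (incr j st.2.1) :: List.replicate (9 - st.1.length) [0, 0, 0] := by
      have hidx : xs.length / 5 = (List.map toL st.1).length := by simp [hlen]
      rw [hA, heq, if_pos (by omega), aCountStep_concat, hidx, modify_boundary, ← toL_incr j hj2]
    rw [hfold, hb]
    by_cases h5 : (xs.length + 1) % 5 = 0
    · rw [if_pos h5]
      refine ⟨by simp, by simp; omega, ?_, by exact ⟨le_refl 0, le_refl 0, le_refl 0⟩, ?_, ?_⟩
      · intro t ht
        rcases List.mem_append.mp ht with ht | ht
        · exact hmem t ht
        · rw [List.mem_singleton.mp ht]; exact nonnegT_incr j st.2.1 hnn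
      · simp only [sumT, List.length_append, List.length_singleton]
        push_cast
        omega
      · rw [hCNT]
        simp only [List.map_append, List.map_cons, List.map_nil, List.length_append,
          List.length_singleton]
        have : toL (0, 0, 0) = [0, 0, 0] := rfl
        rw [List.append_assoc, List.singleton_append, this]
        congr 1
        congr 1
        by_cases h10 : st.1.length + 1 < 10
        · rw [if_pos h10]
          rw [show 9 - st.1.length = (9 - (st.1.length + 1)) + 1 by omega, List.replicate_succ]
        · rw [if_neg h10]
          rw [show 9 - st.1.length = 0 by omega, List.replicate_zero]
    · rw [if_neg h5]
      refine ⟨by simp, by simp; omega, hmem, nonnegT_incr j st.2.1 hnn, ?_, ?_⟩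
      · rw [sumT_incr j hj2, hsum]
        simp only [List.length_append, List.length_singleton]
        push_cast
        omega
      · rw [hCNT, if_pos (by simp; omega)]

theorem decide_neg_lt (x y : Int) : decide (-x < -y) = decide (y < x) := by
  simp only [decide_eq_decide]
  omega

theorem key_transport (a b : Int × Int × Int) :
    keyLtA (toL a) (toL b) = tripLt b a := by
  obtain ⟨a1, a2, a3⟩ := a
  obtain ⟨b1, b2, b3⟩ := b
  show (decide (-a1 < -b1) ||
      (!decide (-b1 < -a1) && (decide (-a2 < -b2) || (!decide (-b2 < -a2) && decide (-a3 < -b3))))) =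
    (decide (b1 < a1) ||
      (!decide (a1 < b1) && (decide (b2 < a2) || (!decide (a2 < b2) && decide (b3 < a3)))))
  simp only [decide_neg_lt]

theorem key_zero_not_lt (t : Int × Int × Int) (h : nonnegT t) :
    keyLtA (toL (0, 0, 0)) (toL t) = false := by
  obtain ⟨h1, h2, h3⟩ := h
  obtain ⟨t1, t2, t3⟩ := t
  show (decide (-(0 : Int) < -t1) ||
      (!decide (-t1 < -(0 : Int)) && (decide (-(0 : Int) < -t2) ||
        (!decide (-t2 < -(0 : Int)) && decide (-(0 : Int) < -t3))))) = false
  simp only [decide_neg_lt, Bool.or_eq_false_iff, Bool.and_eq_false_iff,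
    decide_eq_false_iff_not, Bool.not_eq_false', decide_eq_true_eq]
  simp at h1 h2 h3 ⊢
  omega

theorem mem_foldl_insertBy {α : Type} (bef : α → α → Bool) (gs acc : List α)
    (y : α) (hy : y ∈ List.foldl (fun acc x => PySem.List.insertBy bef x acc) acc gs) :
    y ∈ acc ∨ y ∈ gs := by
  induction gs generalizing acc with
  | nil => exact Or.inl hy
  | cons g t ih =>
    rw [List.foldl_cons] at hy
    rcases ih _ hy with h | h
    · rcases (PySem.List.mem_insertBy _ _ _ _).mp h with h | h
      · exact Or.inr (by simp [h])
      · exact Or.inl h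
    · exact Or.inr (by simp [h])

theorem insertBy_map (f : (Int × Int × Int) → List Int)
    (bef : List Int → List Int → Bool) (bef' : (Int × Int × Int) → (Int × Int × Int) → Bool)
    (hb : ∀ a b, bef (f a) (f b) = bef' a b) (x : Int × Int × Int) (ys : List (Int × Int × Int)) :
    PySem.List.insertBy bef (f x) (ys.map f) = (PySem.List.insertBy bef' x ys).map f := by
  induction ys with
  | nil => rfl
  | cons y t ih =>
    simp only [List.map_cons, PySem.List.insertBy, hb]
    by_cases h : bef' x y
    · rw [if_pos h, if_pos h]; rfl
    · rw [if_neg h, if_neg h, List.map_cons, ih]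

theorem foldl_insert_map (gs : List (Int × Int × Int)) (acc : List (Int × Int × Int)) :
    List.foldl (fun acc x => PySem.List.insertBy keyLtA x acc)
      (acc.map toL) (gs.map toL) =
    (List.foldl (fun acc x => PySem.List.insertBy (fun a b => tripLt b a) x acc)
      acc gs).map toL := by
  induction gs generalizing acc with
  | nil => rfl
  | cons g t ih =>
    simp only [List.map_cons, List.foldl_cons]
    rw [insertBy_map toL _ _ (fun a b => key_transport a b) g acc, ih]

theorem append_zeros_sorted (m : Nat) (S : List (Int × Int × Int)) (j : Nat)
    (hnn : ∀ t ∈ S, nonnegT t) :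
    List.foldl (fun acc x => PySem.List.insertBy keyLtA x acc)
      (S.map toL ++ List.replicate j [0, 0, 0]) (List.replicate m [0, 0, 0]) =
    S.map toL ++ List.replicate (j + m) [0, 0, 0] := by
  induction m generalizing j with
  | zero => rfl
  | succ m ih =>
    rw [List.replicate_succ, List.foldl_cons,
      PySem.List.insertBy_of_forall_not_before _ _ _ ?_]
    · rw [List.append_assoc, ← List.replicate_succ', ih (j + 1)]
      congr 2
      omega
    · intro y hy
      rcases List.mem_append.mp hy with hy | hy
      · obtain ⟨t, ht, rfl⟩ := List.mem_map.mp hy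
        exact key_zero_not_lt t (hnn t ht)
      · rw [List.eq_of_mem_replicate hy]
        exact key_zero_not_lt (0, 0, 0) ⟨le_refl 0, le_refl 0, le_refl 0⟩

theorem sortedA_eq (gs : List (Int × Int × Int)) (m : Nat) (hnn : ∀ t ∈ gs, nonnegT t) :
    List.foldl (fun acc x => PySem.List.insertBy keyLtA x acc) []
        (gs.map toL ++ List.replicate m [0, 0, 0]) =
      (List.foldl (fun acc x => PySem.List.insertBy (fun a b => tripLt b a) x acc) [] gs).map toL ++
        List.replicate m [0, 0, 0] := by
  rw [List.foldl_append]
  have h0 : ([] : List (List Int)) = (([] : List (Int × Int × Int)).map toL) := rfl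
  rw [h0, foldl_insert_map gs []]
  have := append_zeros_sorted m
    (List.foldl (fun acc x => PySem.List.insertBy (fun a b => tripLt b a) x acc) [] gs)
    0 ?_
  · simpa using this
  · intro t ht
    rcases mem_foldl_insertBy _ _ _ _ ht with h | h
    · simp at h
    · exact hnn t h

def ulevels (c0 c1 c2 : Int) : List Int :=
  List.replicate c0.toNat 0 ++ List.replicate c1.toNat 1 ++ List.replicate c2.toNat 2
def costSum (ts : List (Int × Int × Int)) (ls : List Int) : Int :=
  ((ts.zip (ls.map (fun l => bCost.getD l.toNat (0, 0, 0)))).map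
      (fun gm => gm.2.1 * gm.1.1 + gm.2.2.1 * gm.1.2.1 + gm.2.2.2 * gm.1.2.2)).sum

theorem pickScan_ge3 (pk : List Int) (d i s : Int) (p : Nat) (hp : 3 ≤ p) :
    pickScan pk d i s p = (pk, 0) := by
  fun_induction pickScan
  all_goals try rfl
  all_goals rename_i hcond
  all_goals first
    | exact absurd hcond.1 (by omega)
    | exact hcond (by omega)

theorem getD_oob (pk : List Int) (j : Nat) (h : pk.length ≤ j) : pk.getD j 0 = 0 := by
  simp [List.getD, List.getElem?_eq_none_iff.mpr h]

theorem pickScan_char (pk : List Int) (d i s : Int) :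
    pickScan pk d i s 0 =
      if 0 < pk.getD 0 0 then (pk.modify 0 (· - 1), d + i + s)
      else if 0 < pk.getD 1 0 then (pk.modify 1 (· - 1), 5 * d + i + s)
      else if 0 < pk.getD 2 0 then (pk.modify 2 (· - 1), 25 * d + 5 * i + s)
      else (pk, 0) := by
  rw [pickScan]
  by_cases hl0 : 0 < pk.length
  · rw [if_pos hl0]
    by_cases hc0 : 0 < pk.getD 0 0
    · rw [if_pos ⟨rfl, hc0⟩, if_pos hc0]
    · rw [if_neg (by tauto), if_neg (by omega), if_neg (by omega), if_neg hc0, pickScan]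
      by_cases hl1 : 1 < pk.length
      · rw [if_pos hl1]
        by_cases hc1 : 0 < pk.getD 1 0
        · rw [if_neg (by omega), if_pos ⟨rfl, hc1⟩, if_pos hc1]
        · rw [if_neg (by omega), if_neg (by tauto), if_neg (by omega), if_neg hc1, pickScan]
          by_cases hl2 : 2 < pk.length
          · rw [if_pos hl2]
            by_cases hc2 : 0 < pk.getD 2 0
            · rw [if_neg (by omega), if_neg (by omega), if_pos ⟨rfl, hc2⟩, if_pos hc2]
            · rw [if_neg (by omega), if_neg (by omega), if_neg (by tauto), if_neg hc2,
                pickScan_ge3 pk d i s 3 (by omega)]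
          · have hc2 : pk.getD 2 0 = 0 := getD_oob pk 2 (by omega)
            rw [if_neg hl2, if_neg (by omega)]
      · have hc1 : pk.getD 1 0 = 0 := getD_oob pk 1 (by omega)
        have hc2 : pk.getD 2 0 = 0 := getD_oob pk 2 (by omega)
        rw [if_neg hl1, if_neg (by omega), if_neg (by omega)]
  · have hc0 : pk.getD 0 0 = 0 := getD_oob pk 0 (by omega)
    have hc1 : pk.getD 1 0 = 0 := getD_oob pk 1 (by omega)
    have hc2 : pk.getD 2 0 = 0 := getD_oob pk 2 (by omega)
    rw [if_neg hl0, if_neg (by omega), if_neg (by omega), if_neg (by omega)]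

theorem getD_modify_self (pk : List Int) (j : Nat) (f : Int → Int) (h : j < pk.length) :
    (pk.modify j f).getD j 0 = f (pk.getD j 0) := by
  simp [List.getD, List.getElem?_eq_getElem h]

theorem getD_modify_ne (pk : List Int) (j j' : Nat) (f : Int → Int) (h : j ≠ j') :
    (pk.modify j f).getD j' 0 = pk.getD j' 0 := by
  simp [List.getD, h]

theorem len_pos_of_getD (pk : List Int) (j : Nat) (h : pk.getD j 0 ≠ 0) : j < pk.length := by
  by_contra hc
  exact h (getD_oob pk j (by omega))

theorem ulevels_cons0 (c0 c1 c2 : Int) (h : 0 < c0) :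
    ulevels c0 c1 c2 = 0 :: ulevels (c0 - 1) c1 c2 := by
  unfold ulevels
  rw [show c0.toNat = (c0 - 1).toNat + 1 by omega, List.replicate_succ]
  simp

theorem ulevels_cons1 (c0 c1 c2 : Int) (h0 : c0 ≤ 0) (h : 0 < c1) :
    ulevels c0 c1 c2 = 1 :: ulevels c0 (c1 - 1) c2 := by
  unfold ulevels
  rw [show c0.toNat = 0 by omega, show c1.toNat = (c1 - 1).toNat + 1 by omega, List.replicate_succ]
  simp

theorem ulevels_cons2 (c0 c1 c2 : Int) (h0 : c0 ≤ 0) (h1 : c1 ≤ 0) (h : 0 < c2) :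
    ulevels c0 c1 c2 = 2 :: ulevels c0 c1 (c2 - 1) := by
  unfold ulevels
  rw [show c0.toNat = 0 by omega, show c1.toNat = 0 by omega,
    show c2.toNat = (c2 - 1).toNat + 1 by omega, List.replicate_succ]
  simp

theorem ulevels_nil (c0 c1 c2 : Int) (h0 : c0 ≤ 0) (h1 : c1 ≤ 0) (h2 : c2 ≤ 0) :
    ulevels c0 c1 c2 = [] := by
  unfold ulevels
  rw [show c0.toNat = 0 by omega, show c1.toNat = 0 by omega, show c2.toNat = 0 by omega]
  rfl

theorem costSum_nil' (ts : List (Int × Int × Int)) : costSum ts [] = 0 := by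
  cases ts <;> rfl

theorem costSum_cons (t : Int × Int × Int) (ts : List (Int × Int × Int)) (l : Int) (ls : List Int) :
    costSum (t :: ts) (l :: ls) =
      ((bCost.getD l.toNat (0, 0, 0)).1 * t.1 + (bCost.getD l.toNat (0, 0, 0)).2.1 * t.2.1 +
        (bCost.getD l.toNat (0, 0, 0)).2.2 * t.2.2) + costSum ts ls := by
  simp [costSum]

theorem pay_main (ts : List (Int × Int × Int)) (pk : List Int) (a : Int) :
    (List.foldl payStep (pk, a) (ts.map toL)).2 =
      a + costSum ts (ulevels (pk.getD 0 0) (pk.getD 1 0) (pk.getD 2 0)) := by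
  induction ts generalizing pk a with
  | nil => simp [costSum]
  | cons t ts ih =>
    rw [List.map_cons, List.foldl_cons]
    have hps : payStep (pk, a) (toL t) =
        ((pickScan pk t.1 t.2.1 t.2.2 0).1, a + (pickScan pk t.1 t.2.1 t.2.2 0).2) := rfl
    rw [hps, pickScan_char]
    by_cases hc0 : 0 < pk.getD 0 0
    · have hl : 0 < pk.length := len_pos_of_getD pk 0 (by omega)
      rw [if_pos hc0]
      simp only
      rw [ih, getD_modify_self pk 0 _ hl, getD_modify_ne pk 0 1 _ (by omega),
        getD_modify_ne pk 0 2 _ (by omega), ulevels_cons0 _ _ _ hc0, costSum_cons]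
      show _ = a + ((1 * t.1 + 1 * t.2.1 + 1 * t.2.2) + _)
      ring
    · rw [if_neg hc0]
      by_cases hc1 : 0 < pk.getD 1 0
      · have hl : 1 < pk.length := len_pos_of_getD pk 1 (by omega)
        rw [if_pos hc1]
        simp only
        rw [ih, getD_modify_ne pk 1 0 _ (by omega), getD_modify_self pk 1 _ hl,
          getD_modify_ne pk 1 2 _ (by omega), ulevels_cons1 _ _ _ (by omega) hc1, costSum_cons]
        show _ = a + ((5 * t.1 + 1 * t.2.1 + 1 * t.2.2) + _)
        ring
      · rw [if_neg hc1]
        by_cases hc2 : 0 < pk.getD 2 0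
        · have hl : 2 < pk.length := len_pos_of_getD pk 2 (by omega)
          rw [if_pos hc2]
          simp only
          rw [ih, getD_modify_ne pk 2 0 _ (by omega), getD_modify_ne pk 2 1 _ (by omega),
            getD_modify_self pk 2 _ hl, ulevels_cons2 _ _ _ (by omega) (by omega) hc2, costSum_cons]
          show _ = a + ((25 * t.1 + 5 * t.2.1 + 1 * t.2.2) + _)
          ring
        · rw [if_neg hc2]
          simp only
          rw [ih, ulevels_nil _ _ _ (by omega) (by omega) (by omega), costSum_nil', costSum_nil']
          ring

theorem pay_zeros (m : Nat) (st : List Int × Int) :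
    (List.foldl payStep st (List.replicate m [0, 0, 0])).2 = st.2 := by
  induction m generalizing st with
  | zero => rfl
  | succ m ih =>
    rw [List.replicate_succ, List.foldl_cons, ih]
    show st.2 + (pickScan st.1 0 0 0 0).2 = st.2
    rw [pickScan_char]
    split_ifs <;> simp


-- ---- tripLt order facts ----
theorem tripLt_iff (a b : Int × Int × Int) : tripLt a b = true ↔
    (a.1 < b.1 ∨ (a.1 = b.1 ∧ (a.2.1 < b.2.1 ∨ (a.2.1 = b.2.1 ∧ a.2.2 < b.2.2)))) := by
  obtain ⟨a1, a2, a3⟩ := a; obtain ⟨b1, b2, b3⟩ := b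
  simp only [tripLt, Bool.or_eq_true, Bool.and_eq_true, Bool.not_eq_eq_eq_not, Bool.not_true,
    decide_eq_true_eq, decide_eq_false_iff_not]
  constructor
  · rintro (h | ⟨h1, h2 | ⟨h3, h4⟩⟩) <;> omega
  · rintro (h | ⟨h1, h2 | ⟨h3, h4⟩⟩) <;> simp_all

theorem tripLt_irrefl (a : Int × Int × Int) : tripLt a a = false := by
  rw [Bool.eq_false_iff]
  intro h
  rw [tripLt_iff] at h
  omega

theorem tripLt_asymm (a b : Int × Int × Int) (h : tripLt a b = true) : tripLt b a = false := by
  rw [Bool.eq_false_iff]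
  intro h2
  rw [tripLt_iff] at h h2
  omega

theorem tripLt_antisymm (a b : Int × Int × Int) (h1 : tripLt a b = false)
    (h2 : tripLt b a = false) : a = b := by
  rw [Bool.eq_false_iff] at h1 h2
  rw [Ne, tripLt_iff] at h1 h2
  obtain ⟨a1, a2, a3⟩ := a; obtain ⟨b1, b2, b3⟩ := b
  simp only [Prod.mk.injEq]
  simp only [not_or, not_and, not_lt] at h1 h2
  refine ⟨by omega, by omega, by omega⟩

theorem tripLt_chain (x y w : Int × Int × Int) (h1 : tripLt y x = true)
    (h2 : tripLt y w = false) : tripLt x w = false := by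
  rw [Bool.eq_false_iff] at h2 ⊢
  rw [tripLt_iff] at h1
  rw [Ne, tripLt_iff] at h2 ⊢
  intro h3
  omega

-- ---- insertion sort (sortD): permutation and descending pairwise ----
def sortD (gs : List (Int × Int × Int)) : List (Int × Int × Int) :=
  gs.foldl (fun acc x => PySem.List.insertBy (fun a b => tripLt b a) x acc) []

theorem insertBy_perm {α : Type} (bef : α → α → Bool) (x : α) (ys : List α) :
    (PySem.List.insertBy bef x ys).Perm (x :: ys) := by
  induction ys with
  | nil => exact List.Perm.refl _
  | cons y t ih =>
    simp only [PySem.List.insertBy]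
    by_cases h : bef x y
    · rw [if_pos h]
    · rw [if_neg h]
      exact (List.Perm.cons y ih).trans (List.Perm.swap x y t)

theorem foldl_insertBy_perm {α : Type} (bef : α → α → Bool) (gs acc : List α) :
    (List.foldl (fun acc x => PySem.List.insertBy bef x acc) acc gs).Perm (gs ++ acc) := by
  induction gs generalizing acc with
  | nil => simp
  | cons g t ih =>
    rw [List.foldl_cons]
    refine (ih _).trans ?_
    exact (List.Perm.append_left t (insertBy_perm bef g acc)).trans List.perm_middle

theorem sortD_perm (gs : List (Int × Int × Int)) : (sortD gs).Perm gs := by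
  have := foldl_insertBy_perm (fun a b => tripLt b a) gs []
  simpa [sortD] using this

theorem insertBy_pairwise (x : Int × Int × Int) (acc : List (Int × Int × Int))
    (h : acc.Pairwise (fun a b => tripLt a b = false)) :
    (PySem.List.insertBy (fun a b => tripLt b a) x acc).Pairwise
      (fun a b => tripLt a b = false) := by
  induction acc with
  | nil => simp [PySem.List.insertBy]
  | cons y t ih =>
    rw [List.pairwise_cons] at h
    obtain ⟨hy, ht⟩ := h
    simp only [PySem.List.insertBy]
    by_cases hb : tripLt y x = true
    · rw [if_pos hb, List.pairwise_cons]
      refine ⟨?_, List.pairwise_cons.mpr ⟨hy, ht⟩⟩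
      intro z hz
      rcases List.mem_cons.mp hz with rfl | hz
      · exact tripLt_asymm _ _ hb
      · exact tripLt_chain x y z hb (hy z hz)
    · rw [if_neg hb, List.pairwise_cons]
      refine ⟨?_, ih ht⟩
      intro z hz
      rcases (PySem.List.mem_insertBy _ _ _ _).mp hz with rfl | hz
      · exact Bool.eq_false_iff.mpr (fun hc => hb hc)
      · exact hy z hz

theorem sortD_pairwise (gs : List (Int × Int × Int)) :
    (sortD gs).Pairwise (fun a b => tripLt a b = false) := by
  unfold sortD
  suffices h : ∀ acc : List (Int × Int × Int), acc.Pairwise (fun a b => tripLt a b = false) →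
      (List.foldl (fun acc x => PySem.List.insertBy (fun a b => tripLt b a) x acc) acc gs).Pairwise
        (fun a b => tripLt a b = false) by
    exact h [] (by simp)
  induction gs with
  | nil => intro acc h; simpa using h
  | cons g t ih =>
    intro acc h
    rw [List.foldl_cons]
    exact ih _ (insertBy_pairwise g acc h)

-- ---- chunk signatures ----
def addC (cur : Int × Int × Int) (xs : List String) : Int × Int × Int :=
  xs.foldl (fun t x => incr (classIdx x) t) cur

def chunkSigs : List String → List (Int × Int × Int)
  | [] => []
  | x :: t => addC (0, 0, 0) ((x :: t).take 5) :: chunkSigs ((x :: t).drop 5)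
termination_by ms => ms.length
decreasing_by simp

theorem chunkSigs_cons (ms : List String) (h : ms ≠ []) :
    chunkSigs ms = addC (0, 0, 0) (ms.take 5) :: chunkSigs (ms.drop 5) := by
  cases ms with
  | nil => exact absurd rfl h
  | cons x t => simp [chunkSigs]

theorem addC_append (cur : Int × Int × Int) (xs : List String) (x : String) :
    addC cur (xs ++ [x]) = incr (classIdx x) (addC cur xs) := by
  unfold addC
  rw [List.foldl_append]
  rfl

theorem addC_counts (xs : List String) :
    addC (0, 0, 0) xs = ((List.count "diamond" xs : Int), (List.count "iron" xs : Int),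
      (xs.length : Int) - List.count "diamond" xs - List.count "iron" xs) := by
  induction xs using List.reverseRecOn with
  | nil => simp [addC]
  | append_singleton t x ih =>
    rw [addC_append, ih]
    have hcz : ∀ (v : String), x ≠ v → List.count v [x] = 0 := by
      intro v hv
      simp [List.count_singleton, hv]
    have hco : List.count x [x] = 1 := by simp
    have hI0 : ∀ y : Int × Int × Int, incr 0 y = (y.1 + 1, y.2.1, y.2.2) := fun y => rfl
    have hI1 : ∀ y : Int × Int × Int, incr 1 y = (y.1, y.2.1 + 1, y.2.2) := fun y => rfl
    have hI2 : ∀ y : Int × Int × Int, incr 2 y = (y.1, y.2.1, y.2.2 + 1) := fun y => rfl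
    by_cases hd : x = "diamond"
    · subst hd
      rw [show classIdx "diamond" = 0 by decide, hI0]
      simp only [List.count_append, List.length_append, List.length_singleton, Prod.mk.injEq]
      refine ⟨by rw [hco]; push_cast; ring, by rw [hcz _ (by decide)]; push_cast; ring,
        by rw [hco, hcz _ (by decide)]; push_cast; ring⟩
    · by_cases hi : x = "iron"
      · subst hi
        rw [show classIdx "iron" = 1 by decide, hI1]
        simp only [List.count_append, List.length_append, List.length_singleton, Prod.mk.injEq]
        refine ⟨by rw [hcz _ (by decide)]; push_cast; ring, by rw [hco]; push_cast; ring,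
          by rw [hco, hcz _ (by decide)]; push_cast; ring⟩
      · rw [show classIdx x = 2 by unfold classIdx; rw [if_neg hd, if_neg hi], hI2]
        simp only [List.count_append, List.length_append, List.length_singleton, Prod.mk.injEq]
        refine ⟨by rw [hcz _ hd]; push_cast; ring, by rw [hcz _ hi]; push_cast; ring,
          by rw [hcz _ hd, hcz _ hi]; push_cast; ring⟩

theorem count_nonneg_sum_le (xs : List String) :
    List.count "diamond" xs + List.count "iron" xs ≤ xs.length := by
  induction xs with
  | nil => simp
  | cons x t ih =>
    rw [List.count_cons, List.count_cons, List.length_cons]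
    by_cases hd : x = "diamond" <;> by_cases hi : x = "iron" <;> simp_all <;> omega

def validT (t : Int × Int × Int) : Prop :=
  0 ≤ t.1 ∧ 0 ≤ t.2.1 ∧ 0 ≤ t.2.2 ∧ t.1 + t.2.1 + t.2.2 ≤ 5

theorem validT_addC (xs : List String) (h : xs.length ≤ 5) : validT (addC (0, 0, 0) xs) := by
  rw [addC_counts]
  have h1 := count_nonneg_sum_le xs
  have h2 : List.count "diamond" xs ≤ xs.length := List.count_le_length
  have h3 : List.count "iron" xs ≤ xs.length := List.count_le_length
  refine ⟨by positivity, by positivity, by push_cast; omega, by push_cast; omega⟩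

theorem mem_chunkSigs_valid (ms : List String) (t : Int × Int × Int)
    (ht : t ∈ chunkSigs ms) : validT t := by
  induction hn : ms.length using Nat.strong_induction_on generalizing ms with
  | _ n ih =>
    cases ms with
    | nil => simp [chunkSigs] at ht
    | cons x tl =>
      rw [chunkSigs_cons _ (by simp), List.mem_cons] at ht
      rcases ht with rfl | ht
      · exact validT_addC _ (by simp)
      · exact ih ((x :: tl).drop 5).length (by simp only [List.length_drop, List.length_cons] at hn ⊢; omega) _ ht rfl

-- B's pyRange-indexed chunk list is exactly chunkSigs
theorem bSigma_nat (ms : List String) (j : Nat) :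
    bSigma ms ((5 : Int) * (j : Nat)) = addC (0, 0, 0) ((ms.drop (5 * j)).take 5) := by
  unfold bSigma
  have h5 : (5 : Int) * (j : Nat) = ((5 * j : Nat) : Int) := by push_cast; ring
  rw [h5, show ((5 * j : Nat) : Int) + 5 = ((5 * j + 5 : Nat) : Int) by push_cast; ring,
    PySem.List.slice_natCast]
  have : 5 * j + 5 - 5 * j = 5 := by omega
  rw [this]
  rw [addC_counts]
  simp only [PySem.List.count_eq]

theorem chunkSigs_eq_map_range (ms : List String) :
    chunkSigs ms = (List.range ((ms.length + 4) / 5)).map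
      (fun k => addC (0, 0, 0) ((ms.drop (5 * k)).take 5)) := by
  induction hn : ms.length using Nat.strong_induction_on generalizing ms with
  | _ n ihn =>
  subst hn
  cases ms with
  | nil => simp [chunkSigs]
  | cons x tl =>
    rw [chunkSigs_cons _ (by simp)]
    have hIH := ihn ((x :: tl).drop 5).length (by simp) _ rfl
    have hN : ((x :: tl).length + 4) / 5 = (((x :: tl).drop 5).length + 4) / 5 + 1 := by
      simp only [List.length_drop, List.length_cons]
      omega
    rw [hN, List.range_succ_eq_map, List.map_cons, List.map_map]
    refine congrArg₂ List.cons (by simp) ?_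
    rw [hIH]
    apply List.map_congr_left
    intro a _
    simp only [Function.comp]
    rw [show 5 * (a + 1) = (4 + 5 * a) + 1 by ring, List.drop_succ_cons, List.drop_drop,
      List.drop_succ_cons]

theorem kb_eq_chunkSigs (ms : List String) :
    (PySem.List.pyRange 0 (ms.length : Int) 5).map (bSigma ms) = chunkSigs ms := by
  rw [PySem.List.pyRange_of_pos 0 (ms.length : Int) (by norm_num), List.map_map,
    chunkSigs_eq_map_range]
  have hcnt : (if (0 : Int) < (ms.length : Int)
      then (((ms.length : Int) - 0 + 5 - 1) / 5).toNat else 0) = (ms.length + 4) / 5 := by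
    split_ifs with h
    · omega
    · omega
  rw [hcnt]
  apply List.map_congr_left
  intro k _
  simp only [Function.comp]
  rw [show (0 : Int) + 5 * (k : Nat) = 5 * (k : Nat) by ring, bSigma_nat]

-- ---- bStep groups = chunkSigs ----
theorem bStep_noflush (xs : List String) : ∀ (acc : List (Int × Int × Int))
    (cur : Int × Int × Int) (k : Nat), k % 5 + xs.length < 5 →
    xs.foldl bStep (acc, cur, k) = (acc, addC cur xs, k + xs.length) := by
  induction xs with
  | nil => intro acc cur k _; simp [addC]
  | cons x t ih =>
    intro acc cur k h
    rw [List.length_cons] at h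
    rw [List.foldl_cons, bStep_eq]
    simp only
    rw [if_neg (by omega), ih acc _ (k + 1) (by omega)]
    have : addC cur (x :: t) = addC (incr (classIdx x) cur) t := rfl
    rw [this]
    refine congrArg _ ?_
    refine congrArg _ ?_
    rw [List.length_cons]
    omega

theorem bStep_chunk (xs : List String) (h5 : xs.length = 5) (acc : List (Int × Int × Int))
    (k : Nat) (hk : k % 5 = 0) :
    xs.foldl bStep (acc, (0, 0, 0), k) = (acc ++ [addC (0, 0, 0) xs], (0, 0, 0), k + 5) := by
  rcases List.eq_nil_or_concat xs with rfl | ⟨ys, y, rfl⟩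
  · simp at h5
  · rw [List.concat_eq_append] at h5 ⊢
    have hy : ys.length = 4 := by
      rw [List.length_append, List.length_singleton] at h5
      omega
    rw [List.foldl_append, bStep_noflush ys acc (0, 0, 0) k (by omega), List.foldl_cons,
      List.foldl_nil, bStep_eq]
    simp only [hy]
    rw [if_pos (by omega), ← addC_append]

theorem bGroups_eq : ∀ (n : Nat) (ms : List String) (acc : List (Int × Int × Int)) (k : Nat),
    ms.length = n → k % 5 = 0 →
    (if ms.length % 5 ≠ 0
      then (ms.foldl bStep (acc, (0, 0, 0), k)).1 ++ [(ms.foldl bStep (acc, (0, 0, 0), k)).2.1]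
      else (ms.foldl bStep (acc, (0, 0, 0), k)).1) = acc ++ chunkSigs ms := by
  intro n
  induction n using Nat.strong_induction_on with
  | _ n ihn =>
  intro ms acc k hn hk
  rcases List.eq_nil_or_concat ms with rfl | _
  · simp [chunkSigs]
  · have hne : ms ≠ [] := by
      rename_i h
      obtain ⟨ys, y, rfl⟩ := h
      simp
    have hpos : 0 < ms.length := List.length_pos_of_ne_nil hne
    by_cases hlt : ms.length < 5
    · rw [bStep_noflush ms acc (0, 0, 0) k (by omega)]
      simp only
      rw [if_pos (by omega), chunkSigs_cons ms hne,
        List.take_of_length_le (by omega), List.drop_eq_nil_of_le (by omega)]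
      simp [chunkSigs]
    · have hsplit : ms = ms.take 5 ++ ms.drop 5 := (List.take_append_drop 5 ms).symm
      have htlen : (ms.take 5).length = 5 := by
        rw [List.length_take]
        omega
      have hst : ms.foldl bStep (acc, (0, 0, 0), k) =
          (ms.drop 5).foldl bStep (acc ++ [addC (0, 0, 0) (ms.take 5)], (0, 0, 0), k + 5) := by
        conv_lhs => rw [hsplit]
        rw [List.foldl_append, bStep_chunk (ms.take 5) htlen acc k hk]
      have hmod : ms.length % 5 = (ms.drop 5).length % 5 := by
        rw [List.length_drop]
        omega
      rw [hst, hmod,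
        ihn (ms.drop 5).length (by rw [List.length_drop]; omega) (ms.drop 5) _ (k + 5) rfl
          (by omega),
        chunkSigs_cons ms hne, List.append_assoc, List.singleton_append]

-- ---- sigTriples: all valid signatures, strictly descending ----
theorem mem_sigTriples (k : Int × Int × Int) : k ∈ sigTriples ↔ validT k := by
  obtain ⟨d, i, s⟩ := k
  simp only [sigTriples, List.mem_flatMap, List.mem_map, PySem.List.mem_pyRange_neg_one,
    Prod.mk.injEq, validT]
  constructor
  · rintro ⟨a, ⟨ha1, ha2⟩, b, ⟨hb1, hb2⟩, c, ⟨⟨hc1, hc2⟩, rfl, rfl, rfl⟩⟩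
    refine ⟨by omega, by omega, by omega, by omega⟩
  · rintro ⟨h1, h2, h3, h4⟩
    exact ⟨d, ⟨by omega, by omega⟩, i, ⟨by omega, by omega⟩, s, ⟨⟨by omega, by omega⟩, rfl, rfl, rfl⟩⟩

theorem sigTriples_sorted : sigTriples.Pairwise (fun a b => tripLt b a = true) := by decide

theorem sigTriples_nodup : sigTriples.Nodup := by decide

-- ---- counting-sort expansion equals the insertion-sorted list ----
theorem count_flatMap_replicate (l : List (Int × Int × Int)) (hl : l.Nodup)
    (f : (Int × Int × Int) → Nat) (k : Int × Int × Int) :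
    List.count k (l.flatMap (fun x => List.replicate (f x) x)) =
      if k ∈ l then f k else 0 := by
  induction l with
  | nil => simp
  | cons x t ih =>
    rw [List.nodup_cons] at hl
    obtain ⟨hx, ht⟩ := hl
    rw [List.flatMap_cons, List.count_append, List.count_replicate, ih ht]
    by_cases hk : k = x
    · subst hk
      rw [if_pos (by simp), if_neg hx, if_pos List.mem_cons_self]
      omega
    · rw [if_neg (by simp [Ne.symm hk])]
      by_cases hkt : k ∈ t
      · rw [if_pos hkt, if_pos (List.mem_cons_of_mem _ hkt)]
        omega
      · rw [if_neg hkt, if_neg (by simp [hk, hkt])]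

theorem pairwise_replicate_of {α : Type} (R : α → α → Prop) (n : Nat) (x : α) (h : R x x) :
    (List.replicate n x).Pairwise R := by
  induction n with
  | zero => simp
  | succ n ih =>
    rw [List.replicate_succ, List.pairwise_cons]
    exact ⟨fun y hy => by rw [List.eq_of_mem_replicate hy]; exact h, ih⟩

theorem expand_pairwise (l : List (Int × Int × Int))
    (hp : l.Pairwise (fun a b => tripLt b a = true)) (f : (Int × Int × Int) → Nat) :
    (l.flatMap fun x => List.replicate (f x) x).Pairwise (fun a b => tripLt a b = false) := by
  induction l with
  | nil => simp
  | cons x t ih =>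
    rw [List.pairwise_cons] at hp
    obtain ⟨hx, ht⟩ := hp
    rw [List.flatMap_cons, List.pairwise_append]
    refine ⟨pairwise_replicate_of _ _ _ (tripLt_irrefl x), ih ht, ?_⟩
    intro a ha b hb
    rw [List.eq_of_mem_replicate ha]
    obtain ⟨y, hy, hb⟩ := List.mem_flatMap.mp hb
    rw [List.eq_of_mem_replicate hb]
    exact tripLt_asymm _ _ (hx y hy)

theorem expand_perm (gr : List (Int × Int × Int)) (hval : ∀ t ∈ gr, validT t) :
    (sigTriples.flatMap fun k => List.replicate (List.count k gr) k).Perm gr := by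
  rw [List.perm_iff_count]
  intro k
  rw [count_flatMap_replicate sigTriples sigTriples_nodup _ k]
  by_cases hk : k ∈ sigTriples
  · rw [if_pos hk]
  · rw [if_neg hk]
    have : k ∉ gr := fun h => hk ((mem_sigTriples k).mpr (hval k h))
    rw [List.count_eq_zero.mpr this]

theorem sortD_eq_expand (gr : List (Int × Int × Int)) (hval : ∀ t ∈ gr, validT t) :
    sortD gr = sigTriples.flatMap fun k => List.replicate (List.count k gr) k := by
  refine List.eq_of_perm_of_sorted ?_ (sortD_pairwise gr)
    (expand_pairwise sigTriples sigTriples_sorted _)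
    ((sortD_perm gr).trans (expand_perm gr hval).symm)
  intro a b _ _ h1 h2
  exact tripLt_antisymm a b h1 h2

-- ---- the payment fold of B ----
def ustep (st : (List Int × Nat × Int) ⊕ Int) (k : Int × Int × Int) :
    (List Int × Nat × Int) ⊕ Int :=
  match st with
  | .inr a => .inr a
  | .inl s =>
    if s.1.length ≤ advance s.1 s.2.1 then .inr s.2.2
    else .inl (s.1.modify (advance s.1 s.2.1) (· - 1), advance s.1 s.2.1,
        s.2.2 + costOf (advance s.1 s.2.1) k)

def outVal (st : (List Int × Nat × Int) ⊕ Int) : Int :=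
  match st with
  | .inl s => s.2.2
  | .inr a => a

theorem foldl_ustep_frozen (l : List (Int × Int × Int)) (a : Int) :
    List.foldl ustep (.inr a) l = .inr a := by
  induction l with
  | nil => rfl
  | cons x t ih => rw [List.foldl_cons]; exact ih

theorem consumeAux_eq_foldl (k : Int × Int × Int) : ∀ (m : Nat) (s : List Int × Nat × Int),
    consumeAux k s m = List.foldl ustep (.inl s) (List.replicate m k) := by
  intro m
  induction m with
  | zero => intro s; rfl
  | succ m ih =>
    intro s
    rw [List.replicate_succ, List.foldl_cons]
    show (if s.1.length ≤ advance s.1 s.2.1 then Sum.inr s.2.2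
      else consumeAux k (s.1.modify (advance s.1 s.2.1) (· - 1), advance s.1 s.2.1,
        s.2.2 + costOf (advance s.1 s.2.1) k) m) = _
    by_cases h : s.1.length ≤ advance s.1 s.2.1
    · rw [if_pos h]
      show _ = List.foldl ustep (ustep (.inl s) k) _
      rw [show ustep (.inl s) k = .inr s.2.2 by simp [ustep, if_pos h], foldl_ustep_frozen]
    · rw [if_neg h]
      rw [ih]
      refine congrArg (fun st => List.foldl ustep st (List.replicate m k)) ?_
      simp [ustep, if_neg h]

theorem foldl_bPayStep_expand (sig : PySem.Dict (Int × Int × Int) Int) :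
    ∀ (l : List (Int × Int × Int)) (st : (List Int × Nat × Int) ⊕ Int),
    List.foldl (bPayStep sig) st l =
      List.foldl ustep st (l.flatMap fun k => List.replicate ((sig.getD k 0).toNat) k) := by
  intro l
  induction l with
  | nil => intro st; rfl
  | cons k t ih =>
    intro st
    rw [List.foldl_cons, List.flatMap_cons, List.foldl_append, ih]
    refine congrArg (fun st => List.foldl ustep st _) ?_
    cases st with
    | inr a =>
      rw [show bPayStep sig (.inr a) k = .inr a from rfl, foldl_ustep_frozen]
    | inl s =>
      rw [show bPayStep sig (.inl s) k = consume s k (sig.getD k 0) from rfl]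
      unfold consume
      rw [consumeAux_eq_foldl]

theorem advance_spec (rem : List Int) : ∀ (fuel : Nat) (lvl : Nat),
    rem.length - lvl ≤ fuel →
    lvl ≤ advance rem lvl ∧
    (∀ j, lvl ≤ j → j < advance rem lvl → rem.getD j 0 ≤ 0) ∧
    (rem.length ≤ advance rem lvl ∨
      (advance rem lvl < rem.length ∧ 0 < rem.getD (advance rem lvl) 0)) := by
  intro fuel
  induction fuel with
  | zero =>
    intro lvl hf
    have hl : rem.length ≤ lvl := by omega
    have ha : advance rem lvl = lvl := by
      unfold advance
      rw [List.drop_eq_nil_of_le hl, advanceAux]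
    rw [ha]
    exact ⟨le_refl _, fun j h1 h2 => absurd h1 (by omega), Or.inl hl⟩
  | succ fuel ih =>
    intro lvl hf
    cases hd : rem.drop lvl with
    | nil =>
      have hl : rem.length ≤ lvl := by
        have h := congrArg List.length hd
        simp only [List.length_drop, List.length_nil] at h
        omega
      have ha : advance rem lvl = lvl := by
        unfold advance
        rw [hd, advanceAux]
      rw [ha]
      exact ⟨le_refl _, fun j h1 h2 => absurd h1 (by omega), Or.inl hl⟩
    | cons r t =>
      have hlvl : lvl < rem.length := by
        by_contra hc
        rw [List.drop_eq_nil_of_le (by omega)] at hd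
        simp at hd
      have h0 : rem[lvl]? = some r := by
        have h := congrArg (fun (l : List Int) => l[0]?) hd
        simpa [List.getElem?_drop] using h
      have hget : rem.getD lvl 0 = r := by
        simp [List.getD, h0]
      have hstep : advance rem lvl = if r ≤ 0 then advance rem (lvl + 1) else lvl := by
        unfold advance
        rw [hd]
        show advanceAux (r :: t) lvl = _
        rw [advanceAux]
        by_cases hr : r ≤ 0
        · rw [if_pos hr, if_pos hr]
          have ht : rem.drop (lvl + 1) = t := by
            have h := congrArg (List.drop 1) hd
            rwa [List.drop_drop, List.drop_one, List.tail_cons] at h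
          rw [ht]
        · rw [if_neg hr, if_neg hr]
      by_cases hr : r ≤ 0
      · rw [hstep, if_pos hr]
        obtain ⟨h1, h2, h3⟩ := ih (lvl + 1) (by omega)
        refine ⟨by omega, ?_, h3⟩
        intro j hj1 hj2
        rcases Nat.eq_or_lt_of_le hj1 with rfl | hj1'
        · rw [hget]; exact hr
        · exact h2 j hj1' hj2
      · rw [hstep, if_neg hr]
        exact ⟨le_refl _, fun j h1 h2 => absurd h1 (by omega),
          Or.inr ⟨hlvl, by rw [hget]; omega⟩⟩

theorem costSum_nil2 (ls : List Int) : costSum [] ls = 0 := rfl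

theorem pay_fold (ts : List (Int × Int × Int)) : ∀ (rem : List Int) (lvl : Nat) (ans : Int),
    rem.length ≤ 3 → (∀ j, j < lvl → rem.getD j 0 ≤ 0) →
    outVal (List.foldl ustep (.inl (rem, lvl, ans)) ts) =
      ans + costSum ts (ulevels (rem.getD 0 0) (rem.getD 1 0) (rem.getD 2 0)) := by
  induction ts with
  | nil =>
    intro rem lvl ans _ _
    rw [List.foldl_nil, costSum_nil2]
    show ans = ans + 0
    omega
  | cons k ts ih =>
    intro rem lvl ans hlen hinv
    obtain ⟨hge, hmid, hend⟩ := advance_spec rem (rem.length - lvl) lvl (le_refl _)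
    set l := advance rem lvl with hl
    have hall : ∀ j, j < l → rem.getD j 0 ≤ 0 := by
      intro j hj
      rcases Nat.lt_or_ge j lvl with h | h
      · exact hinv j h
      · exact hmid j h hj
    rw [List.foldl_cons]
    by_cases hle : rem.length ≤ l
    · rw [show ustep (.inl (rem, lvl, ans)) k = .inr ans by simp [ustep, ← hl, if_pos hle],
        foldl_ustep_frozen]
      have hz : ∀ j : Nat, rem.getD j 0 ≤ 0 := by
        intro j
        rcases Nat.lt_or_ge j rem.length with h | h
        · exact hall j (by omega)
        · rw [getD_oob rem j h]
      rw [ulevels_nil _ _ _ (hz 0) (hz 1) (hz 2), costSum_nil']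
      show ans = ans + 0
      omega
    · have hlt : l < rem.length := by omega
      have hpos : 0 < rem.getD l 0 := by
        rcases hend with h | ⟨_, h⟩
        · omega
        · exact h
      rw [show ustep (.inl (rem, lvl, ans)) k =
            .inl (rem.modify l (· - 1), l, ans + costOf l k) by
          simp only [ustep, ← hl]
          rw [if_neg (by omega)],
        ih _ _ _ (by rw [List.length_modify]; omega)
          (by
            intro j hj
            rw [getD_modify_ne rem l j _ (by omega)]
            exact hall j hj)]
      have hl3 : l < 3 := by omega
      interval_cases l
      · rw [getD_modify_self rem 0 _ hlt, getD_modify_ne rem 0 1 _ (by omega),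
          getD_modify_ne rem 0 2 _ (by omega), ulevels_cons0 _ _ _ hpos, costSum_cons]
        norm_num [costOf, bCost, show ((0:Int).toNat) = 0 from rfl, show ((1:Int).toNat) = 1 from rfl, show ((2:Int).toNat) = 2 from rfl]
        ring
      · rw [getD_modify_self rem 1 _ hlt, getD_modify_ne rem 1 0 _ (by omega),
          getD_modify_ne rem 1 2 _ (by omega), ulevels_cons1 _ _ _ (hall 0 (by omega)) hpos,
          costSum_cons]
        norm_num [costOf, bCost, show ((0:Int).toNat) = 0 from rfl, show ((1:Int).toNat) = 1 from rfl, show ((2:Int).toNat) = 2 from rfl]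
        ring
      · rw [getD_modify_self rem 2 _ hlt, getD_modify_ne rem 2 0 _ (by omega),
          getD_modify_ne rem 2 1 _ (by omega),
          ulevels_cons2 _ _ _ (hall 0 (by omega)) (hall 1 (by omega)) hpos, costSum_cons]
        norm_num [costOf, bCost, show ((0:Int).toNat) = 0 from rfl, show ((1:Int).toNat) = 1 from rfl, show ((2:Int).toNat) = 2 from rfl]
        ring

theorem getD_take3 (picks : List Int) (j : Nat) (hj : j < 3) :
    (picks.take 3).getD j 0 = picks.getD j 0 := by
  simp [List.getD, List.getElem?_take, hj]
theorem match_eq_outVal (st : (List Int × Nat × Int) ⊕ Int) :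
    (match st with | .inl s => s.2.2 | .inr a => a) = outVal st := rfl

-- ===== VERDICT (by name: the statement is the Claim_ definition above) =====
set_option maxHeartbeats 4000000 in
theorem solution_spec : Claim_equal_solution := by
  unfold Claim_equal_solution Spec_solution
  intro picks minerals _ hpre
  dsimp only [solution, solution_alt]
  set ms := PySem.List.slice minerals none
    (some (min (minerals.length : Int) (picks.sum * 5))) with hms
  have h50 : ms.length ≤ 50 := slice_len_le picks minerals hpre
  obtain ⟨hk, hlen, hmem, hnn, hsum, heq⟩ := count_inv ms h50
  set st := ms.foldl bStep ([], (0, 0, 0), 0) with hst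
  set gr := (if ms.length % 5 ≠ 0 then st.1 ++ [st.2.1] else st.1) with hgr
  have hbg : gr = chunkSigs ms := by
    rw [hgr, hst]
    have := bGroups_eq ms.length ms [] 0 rfl (by omega)
    simpa using this
  have hl10 : st.1.length ≤ 10 := by rw [hlen]; omega
  have hcnt : (List.range ms.length).foldl (aCountStep ms) (List.replicate 10 [0, 0, 0]) =
      gr.map toL ++ List.replicate (10 - gr.length) [0, 0, 0] := by
    rw [heq, hgr]
    by_cases h5 : ms.length % 5 = 0
    · rw [if_neg (show ¬(ms.length % 5 ≠ 0) by omega)]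
      have hz : st.2.1.1 = 0 ∧ st.2.1.2.1 = 0 ∧ st.2.1.2.2 = 0 := by
        unfold sumT at hsum
        obtain ⟨a, b, c⟩ := hnn
        omega
      have htz : toL st.2.1 = [0, 0, 0] := by
        simp [toL, hz.1, hz.2.1, hz.2.2]
      by_cases h10 : st.1.length < 10
      · rw [if_pos h10, htz, show 10 - st.1.length = (9 - st.1.length) + 1 by omega,
          List.replicate_succ]
      · rw [if_neg h10, show 10 - st.1.length = 0 by omega, List.replicate_zero,
          List.append_nil]
    · rw [if_pos h5]
      rw [if_pos (show st.1.length < 10 by rw [hlen]; omega), List.map_append,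
        List.map_singleton, List.length_append,
        List.length_singleton, List.append_assoc, List.singleton_append,
        show 10 - (st.1.length + 1) = 9 - st.1.length by omega]
  have hgrnn : ∀ t ∈ gr, nonnegT t := by
    rw [hgr]
    split_ifs with h5
    · intro t ht
      rcases List.mem_append.mp ht with ht | ht
      · exact hmem t ht
      · rw [List.mem_singleton.mp ht]; exact hnn
    · exact hmem
  -- A's value: payment over the insertion-sorted groups
  rw [hcnt, sortedA_eq gr (10 - gr.length) hgrnn, List.foldl_append, pay_zeros, pay_main,
    zero_add]
  -- B's value
  have hval : ∀ t ∈ chunkSigs ms, validT t := mem_chunkSigs_valid ms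
  have h1 : List.foldl (fun dct g => dct.insert (bSigma ms g) (dct.getD (bSigma ms g) 0 + 1))
      (PySem.Dict.empty : PySem.Dict (Int × Int × Int) Int)
      (PySem.List.pyRange 0 (ms.length : Int) 5) =
      List.foldl (fun dct k => dct.insert k (dct.getD k 0 + 1)) PySem.Dict.empty
        (chunkSigs ms) := by
    rw [← kb_eq_chunkSigs, List.foldl_map]
  rw [h1, PySem.List.slice_to picks (by norm_num), show ((3 : Int).toNat) = 3 from rfl,
    match_eq_outVal, foldl_bPayStep_expand]
  simp only [PySem.Dict.getD_foldl_insert_add_one, PySem.Dict.getD_empty, zero_add,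
    Int.toNat_natCast]
  rw [← sortD_eq_expand (chunkSigs ms) hval, ← hbg,
    pay_fold (sortD gr) (picks.take 3) 0 0 (by rw [List.length_take]; omega)
      (by intro j hj; omega),
    getD_take3 picks 0 (by omega), getD_take3 picks 1 (by omega),
    getD_take3 picks 2 (by omega), zero_add]
  rfl
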